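-- pv_equiv track=rewrite | github.com/ddalkigum/baekjun | programmers/center_word.py | solution
-- ===== SOURCE A (Python) =====
-- def solution(s):
--     answer=""
--     for word in range(int(len(s)/2)+1):
--         if len(s)%2 ==0:
--             if word == int(len(s)/2):
--                 answer = (s[word-1]+ s[word])
--         else:
--             if word == int(len(s)/2):
--                 answer = (s[word])
--     return answer
-- ===== SOURCE B (Python) =====
-- def solution(s):
--     # Peel one character off each end until at most two remain: what is
--     # left is the center character (odd length) or the two center
--     # characters (even length).
--     while len(s) > 2:
--         s = s[1:-1]
--     return s
-- ===== Notes on version B (the rewrite author's own statement) =====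
-- stated objective: alternative
-- what changed: Replaces A's index loop over range(len(s)//2+1) (which only assigns on its final iteration) by a two-pointer peeling loop that strips one character from each end until at most two remain.
import Mathlib
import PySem

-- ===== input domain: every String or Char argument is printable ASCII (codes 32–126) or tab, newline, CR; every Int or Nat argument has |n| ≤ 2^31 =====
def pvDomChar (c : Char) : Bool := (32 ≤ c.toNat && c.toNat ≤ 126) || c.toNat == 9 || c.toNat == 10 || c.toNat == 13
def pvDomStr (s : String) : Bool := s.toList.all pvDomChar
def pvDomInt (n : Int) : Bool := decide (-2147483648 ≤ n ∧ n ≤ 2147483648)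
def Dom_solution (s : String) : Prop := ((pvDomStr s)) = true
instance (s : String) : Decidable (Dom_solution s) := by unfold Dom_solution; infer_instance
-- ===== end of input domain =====

-- B replaces A's index loop (which only assigns on its final iteration) by a two-pointer
-- peeling loop: strip one character from each end until at most two remain.

-- ===== PORT A =====
-- int(len(s)/2) equals len(s) // 2 exactly for nonnegative lengths (ported as floordiv).
def solution (s : String) : String :=
  let cs := s.toList
  let n : Int := cs.length
  let mid : Int := PySem.Int.floordiv n 2
  String.ofList <|
    (PySem.List.pyRange 0 (mid + 1) 1).foldl
      (fun answer word =>
        if PySem.Int.mod n 2 = 0 then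
          if word = mid then
            [PySem.List.pyGetD cs (word - 1) ' ', PySem.List.pyGetD cs word ' ']
          else answer
        else
          if word = mid then [PySem.List.pyGetD cs word ' '] else answer)
      ([] : List Char)

-- ===== PORT B =====
-- 'while len(s) > 2: s = s[1:-1]'; the fuel (the initial length) only bounds the number of
-- iterations — the loop exits through the length test exactly as the Python loop does.
-- s[1:-1] is ported as PySem.List.slice cs (some 1) (some (-1)).
def stripGo : Nat → List Char → List Char
  | 0, cs => cs
  | fuel + 1, cs =>
      if cs.length ≤ 2 then cs
      else stripGo fuel (PySem.List.slice cs (some 1) (some (-1)))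

def solution_alt (s : String) : String :=
  String.ofList (stripGo s.toList.length s.toList)

-- ===== PRECONDITION & SPEC =====
-- Pre_ excludes only the empty string, on which A raises IndexError (s[-1] on the even branch).
def Pre_solution (s : String) : Prop := s ≠ ""
instance (s : String) : Decidable (Pre_solution s) := by unfold Pre_solution; infer_instance
def pvWitness_solution : String := "abc"
def Spec_solution (s : String) (out : String) : Prop := out = solution_alt s
instance (s : String) (out : String) : Decidable (Spec_solution s out) := by unfold Spec_solution; infer_instance

-- ===== CLAIM (what is proved, stated in full; the proofs are below) =====
def Claim_equal_solution : Prop := ∀ (s : String), Dom_solution s → Pre_solution s → Spec_solution s (solution s)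

-- ===== LEMMAS AND PROOFS =====

-- the common closed form of both programs, on the character list
def centerChars (cs : List Char) : List Char :=
  if cs.length % 2 = 0 then [cs.getD (cs.length / 2 - 1) ' ', cs.getD (cs.length / 2) ' ']
  else [cs.getD (cs.length / 2) ' ']

lemma slice_mid_eq (cs : List Char) (h : 1 ≤ cs.length) :
    PySem.List.slice cs (some 1) (some (-1)) = cs.tail.dropLast := by
  simp only [PySem.List.slice, Int.reduceNeg, Order.lt_one_iff, PySem.List.clampIdx_neg_ofNat,
    zero_le_one, PySem.List.clampIdx_of_nonneg, Int.toNat_one, List.dropLast_eq_take,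
    ← List.drop_one, min_eq_left h, List.length_drop]

lemma foldl_fixed {α : Type} (f : List Char → α → List Char) (l : List α)
    (h : ∀ w ∈ l, ∀ a, f a w = a) : ∀ a, l.foldl f a = a := by
  induction l with
  | nil => intro a; rfl
  | cons x xs ih =>
      intro a
      simp only [List.foldl_cons, h x (by simp)]
      exact ih (fun w hw a => h w (by simp [hw]) a) a

lemma getD_tail_dropLast (cs : List Char) (i : Nat) (h : i + 2 < cs.length) :
    cs.tail.dropLast.getD i ' ' = cs.getD (i + 1) ' ' := by
  rw [List.getD_eq_getElem _ _ (by simp; omega), List.getD_eq_getElem _ _ (by omega),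
      List.getElem_dropLast, List.getElem_tail]

lemma stripGo_eq_center : ∀ (fuel : Nat) (cs : List Char), cs.length ≤ fuel → cs ≠ [] →
    stripGo fuel cs = centerChars cs := by
  intro fuel
  induction fuel with
  | zero =>
      intro cs hle hne
      exact absurd (List.length_eq_zero_iff.mp (by omega)) hne
  | succ fuel ih =>
      intro cs hle hne
      rw [stripGo]
      by_cases hsmall : cs.length ≤ 2
      · rw [if_pos hsmall]
        match cs, hne with
        | [a], _ => simp [centerChars]
        | [a, b], _ => simp [centerChars]
        | a :: b :: c :: t, _ => simp at hsmall
      · rw [if_neg hsmall, slice_mid_eq cs (by omega)]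
        have hlen' : cs.tail.dropLast.length = cs.length - 2 := by
          simp only [List.length_dropLast, List.length_tail]; omega
        rw [ih cs.tail.dropLast (by omega)
              (by intro hc; rw [hc] at hlen'; simp at hlen'; omega)]
        unfold centerChars
        rw [hlen']
        have hmod : (cs.length - 2) % 2 = cs.length % 2 := by omega
        have hdiv : (cs.length - 2) / 2 = cs.length / 2 - 1 := by omega
        rw [hmod, hdiv]
        by_cases hpar : cs.length % 2 = 0
        · rw [if_pos hpar, if_pos hpar,
              getD_tail_dropLast cs (cs.length / 2 - 1 - 1) (by omega),
              getD_tail_dropLast cs (cs.length / 2 - 1) (by omega),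
              (by omega : (cs.length / 2 - 1 - 1) + 1 = cs.length / 2 - 1),
              (by omega : (cs.length / 2 - 1) + 1 = cs.length / 2)]
        · rw [if_neg hpar, if_neg hpar,
              getD_tail_dropLast cs (cs.length / 2 - 1) (by omega),
              (by omega : (cs.length / 2 - 1) + 1 = cs.length / 2)]

lemma solution_eq_center (s : String) (hne : s.toList ≠ []) :
    solution s = String.ofList (centerChars s.toList) := by
  unfold solution
  simp only []
  set cs := s.toList with hcs
  have hlen1 : 1 ≤ cs.length := by
    cases h : cs.length with
    | zero => exact absurd (List.length_eq_zero_iff.mp h) hne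
    | succ k => omega
  set n : Int := (cs.length : Int) with hn
  set mid : Int := PySem.Int.floordiv n 2 with hmid
  have hmid' : mid = ((cs.length / 2 : Nat) : Int) := by
    rw [hmid, hn]; exact_mod_cast PySem.Int.floordiv_natCast cs.length 2
  have hmid0 : 0 ≤ mid := by rw [hmid']; positivity
  have hsplit : PySem.List.pyRange 0 (mid + 1) 1 =
      PySem.List.pyRange 0 mid 1 ++ [mid] := PySem.List.pyRange_one_succ_right (by omega)
  rw [hsplit, List.foldl_append]
  rw [foldl_fixed _ (PySem.List.pyRange 0 mid 1) (by
    intro w hw a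
    have := (PySem.List.mem_pyRange_one).mp hw
    have hne' : w ≠ mid := by omega
    simp [hne']) []]
  have hmodc : PySem.Int.mod n 2 = ((cs.length % 2 : Nat) : Int) := by
    rw [hn]; exact_mod_cast PySem.Int.mod_natCast cs.length 2
  unfold centerChars
  by_cases hpar : cs.length % 2 = 0
  · have hcond : PySem.Int.mod n 2 = 0 := by rw [hmodc, hpar]; rfl
    have hlen2 : 2 ≤ cs.length := by omega
    have hm1 : ((cs.length / 2 : Nat) : Int) - 1 = ((cs.length / 2 - 1 : Nat) : Int) := by omega
    simp only [List.foldl_cons, List.foldl_nil, if_pos hcond, if_true, if_pos hpar,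
      hmid', hm1, PySem.List.pyGetD_natCast]
  · have hcond : PySem.Int.mod n 2 ≠ 0 := by
      rw [hmodc]; exact_mod_cast (by omega : (cs.length % 2 : Int) ≠ 0)
    simp only [List.foldl_cons, List.foldl_nil, if_neg hcond, if_true, if_neg hpar,
      hmid', PySem.List.pyGetD_natCast]

-- ===== VERDICT (by name: the statements are the Claim_ definitions above) =====
theorem solution_spec : Claim_equal_solution := by
  intro s _ hpre
  unfold Spec_solution solution_alt
  have hne : s.toList ≠ [] := fun hc => hpre (String.toList_eq_nil_iff.mp hc)
  rw [solution_eq_center s hne, stripGo_eq_center s.toList.length s.toList le_rfl hne]
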